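-- pv_equiv track=rewrite | github.com/ZaidShalabyeh52/Cryptography-Project | VigenereCipher/VigenereDecrypt.py | find_repeated_sequences_spacings
-- ===== SOURCE A (Python) =====
-- from collections import Counter, defaultdict
--
-- def find_repeated_sequences_spacings(text, seq_len=3):
--     spacing = defaultdict(list)
--
--     for i in range(len(text) - seq_len):
--         seq = text[i:i+seq_len]
--         spacing[seq].append(i)
--
--     distances = []
--
--     # If a sequence appears more than once, calculate the gaps
--     for positions in spacing.values():
--         if len(positions) > 1:
--             for i in range(len(positions)-1):
--                 distances.append(positions[i+1] - positions[i])
--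
--     return distances
-- ===== SOURCE B (Python) =====
-- def find_repeated_sequences_spacings(text, seq_len=3):
--     # One pass: track each substring's most recent index and accumulate gaps as they appear.
--     last = {}
--     diffs = {}
--     for i in range(len(text) - seq_len):
--         seq = text[i:i+seq_len]
--         if seq in last:
--             diffs.setdefault(seq, []).append(i - last[seq])
--         last[seq] = i
--     result = []
--     for seq in last:  # first-occurrence order, matching A's dict order
--         result.extend(diffs.get(seq, []))
--     return result
-- ===== Notes on version B (the rewrite author's own statement) =====
-- stated objective: alternative
-- what changed: B fuses A's two phases (build full position lists per substring, then difference them) into one incremental pass that keeps only each substring's last-seen index and appends gaps as they arise, concatenating per-substring gap lists in first-occurrence order at the end.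
import Mathlib
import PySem

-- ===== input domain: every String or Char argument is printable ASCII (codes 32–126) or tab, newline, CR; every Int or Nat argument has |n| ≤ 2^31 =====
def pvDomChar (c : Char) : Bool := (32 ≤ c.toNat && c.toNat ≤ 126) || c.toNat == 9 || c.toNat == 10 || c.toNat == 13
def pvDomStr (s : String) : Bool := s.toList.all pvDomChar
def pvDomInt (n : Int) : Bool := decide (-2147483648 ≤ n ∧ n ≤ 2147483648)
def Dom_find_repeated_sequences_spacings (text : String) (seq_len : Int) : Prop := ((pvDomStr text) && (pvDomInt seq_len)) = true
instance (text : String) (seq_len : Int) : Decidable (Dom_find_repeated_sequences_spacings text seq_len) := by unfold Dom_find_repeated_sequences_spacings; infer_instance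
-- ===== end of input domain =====

-- B fuses A's build-all-positions-then-difference phases into a single last-seen/gap pass
-- with the same output order (first-occurrence order of substrings); alternative, same cost.

-- ===== PORT A =====
def find_repeated_sequences_spacings (text : String) (seq_len : Int) : List Int :=
  let cs := text.toList
  let spacing := (PySem.List.pyRange 0 (PySem.Str.len text - seq_len) 1).foldl
    (fun d i =>
      d.modify (PySem.List.slice cs (some i) (some (i + seq_len))) [] (fun l => l ++ [i]))
    PySem.Dict.empty
  spacing.values.foldl
    (fun distances positions =>
      if 1 < positions.length then
        (PySem.List.pyRange 0 ((positions.length : Int) - 1) 1).foldl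
          (fun acc i => acc ++ [PySem.List.pyGetD positions (i + 1) 0 - PySem.List.pyGetD positions i 0])
          distances
      else distances)
    []

-- ===== PORT B =====
def find_repeated_sequences_spacings_alt (text : String) (seq_len : Int) : List Int :=
  let cs := text.toList
  let st := (PySem.List.pyRange 0 (PySem.Str.len text - seq_len) 1).foldl
    (fun (st : PySem.Dict (List Char) Int × PySem.Dict (List Char) (List Int)) i =>
      (st.1.insert (PySem.List.slice cs (some i) (some (i + seq_len))) i,
       match st.1.get? (PySem.List.slice cs (some i) (some (i + seq_len))) with
       | some j => st.2.modify (PySem.List.slice cs (some i) (some (i + seq_len))) [] (fun l => l ++ [i - j])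
       | none => st.2))
    (PySem.Dict.empty, PySem.Dict.empty)
  st.1.keys.foldl (fun result seq => result ++ st.2.getD seq []) []

-- ===== PRECONDITION & SPEC =====
def Spec_find_repeated_sequences_spacings (text : String) (seq_len : Int) (out : List Int) : Prop := out = find_repeated_sequences_spacings_alt text seq_len
instance (text : String) (seq_len : Int) (out : List Int) : Decidable (Spec_find_repeated_sequences_spacings text seq_len out) := by unfold Spec_find_repeated_sequences_spacings; infer_instance

-- ===== CLAIM (what is proved, stated in full; the proofs are below) =====
def Claim_equal_find_repeated_sequences_spacings : Prop := ∀ (text : String) (seq_len : Int), Dom_find_repeated_sequences_spacings text seq_len → Spec_find_repeated_sequences_spacings text seq_len (find_repeated_sequences_spacings text seq_len)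

-- ===== LEMMAS AND PROOFS =====

/-- consecutive differences of a list -/
def adjDiffs : List Int → List Int
  | [] => []
  | [_] => []
  | a :: b :: t => (b - a) :: adjDiffs (b :: t)

/-- positions of key c among indices idxs under key function f -/
def positionsOf (f : Int → List Char) (idxs : List Int) (c : List Char) : List Int :=
  idxs.filter (fun i => f i == c)

lemma adjDiffs_short (ps : List Int) (h : ps.length ≤ 1) : adjDiffs ps = [] := by
  match ps with
  | [] => rfl
  | [_] => rfl
  | _ :: _ :: _ => simp at h

lemma adjDiffs_concat (ps : List Int) (j i : Int) (h : ps.getLast? = some j) :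
    adjDiffs (ps ++ [i]) = adjDiffs ps ++ [i - j] := by
  match ps with
  | [] => simp at h
  | [a] => simp at h; subst h; simp [adjDiffs]
  | a :: b :: t =>
      have ih := adjDiffs_concat (b :: t) j i (by simpa using h)
      simp only [List.cons_append, adjDiffs] at ih ⊢
      rw [ih]

lemma map_range_adjDiffs (ps : List Int) :
    (List.range (ps.length - 1)).map (fun k => ps.getD (k + 1) 0 - ps.getD k 0) = adjDiffs ps := by
  match ps with
  | [] => rfl
  | [_] => rfl
  | a :: b :: t =>
      have ih := map_range_adjDiffs (b :: t)
      simp only [List.length_cons, Nat.add_sub_cancel] at ih ⊢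
      rw [List.range_succ_eq_map]
      simp only [List.map_cons, List.map_map, Function.comp_def, List.getD_cons_succ,
        List.getD_cons_zero, adjDiffs]
      exact congrArg _ ih

lemma innerA_eq (ps acc : List Int) :
    (PySem.List.pyRange 0 ((ps.length : Int) - 1) 1).foldl
      (fun acc i => acc ++ [PySem.List.pyGetD ps (i + 1) 0 - PySem.List.pyGetD ps i 0]) acc
    = acc ++ adjDiffs ps := by
  match ps with
  | [] =>
      rw [PySem.List.pyRange_one_eq_nil (by norm_num)]
      simp [adjDiffs]
  | p :: t =>
      have hcast : (((p :: t).length : Int) - 1) = (((p :: t).length - 1 : Nat) : Int) := by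
        simp
      rw [hcast, PySem.List.pyRange_zero_natCast, List.foldl_map,
        PySem.List.foldl_append_eq_flatMap]
      congr 1
      rw [← map_range_adjDiffs (p :: t)]
      have hfm : ∀ (g : ℕ → ℤ) (l : List ℕ), List.flatMap (fun y => [g y]) l = l.map g := by
        intro g l; induction l <;> simp_all
      rw [hfm]
      apply List.map_congr_left
      intro k _
      have h1 : ((k : Int) + 1) = ((k + 1 : Nat) : Int) := by push_cast; ring
      rw [h1, PySem.List.pyGetD_natCast, PySem.List.pyGetD_natCast]

lemma spacing_getD (f : Int → List Char) (idxs : List Int) (c : List Char) :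
    (idxs.foldl (fun d i => d.modify (f i) [] (fun l => l ++ [i])) PySem.Dict.empty).getD c []
    = positionsOf f idxs c := by
  have h := PySem.Dict.getD_foldl_modify_append (idxs.map (fun i => ((f i, i) : List Char × Int)))
    PySem.Dict.empty c
  rw [List.foldl_map] at h
  simp only [PySem.Dict.getD_empty, List.nil_append] at h
  rw [h, List.filter_map]
  simp [positionsOf, Function.comp_def, List.map_map]

lemma fst_loopB (f : Int → List Char) (idxs : List Int)
    (st : PySem.Dict (List Char) Int × PySem.Dict (List Char) (List Int)) :
    (idxs.foldl
      (fun st i =>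
        (st.1.insert (f i) i,
         match st.1.get? (f i) with
         | some j => st.2.modify (f i) [] (fun l => l ++ [i - j])
         | none => st.2)) st).1
    = idxs.foldl (fun d i => d.insert (f i) i) st.1 := by
  induction idxs generalizing st with
  | nil => rfl
  | cons a t ih => simp only [List.foldl_cons]; rw [ih]

lemma get?_insert_fold (f : Int → List Char) (idxs : List Int) (c : List Char) :
    (idxs.foldl (fun d i => d.insert (f i) i) PySem.Dict.empty).get? c
    = (positionsOf f idxs c).getLast? := by
  induction idxs using List.reverseRecOn with
  | nil => simp [positionsOf, PySem.Dict.get?_empty]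
  | append_singleton t a ih =>
      rw [List.foldl_append, List.foldl_cons, List.foldl_nil, PySem.Dict.get?_insert]
      simp only [positionsOf, List.filter_append, List.filter_cons, List.filter_nil]
      by_cases hc : c = f a
      · subst hc
        simp only [beq_self_eq_true]
        simp
      · rw [if_neg hc]
        have : (f a == c) = false := by simp; exact fun h => hc h.symm
        simp [this, ih, positionsOf]

lemma snd_loopB (f : Int → List Char) (idxs : List Int) (c : List Char) :
    (idxs.foldl
      (fun st i =>
        (st.1.insert (f i) i,
         match st.1.get? (f i) with
         | some j => st.2.modify (f i) [] (fun l => l ++ [i - j])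
         | none => st.2)) (PySem.Dict.empty, PySem.Dict.empty)).2.getD c []
    = adjDiffs (positionsOf f idxs c) := by
  induction idxs using List.reverseRecOn with
  | nil => simp [positionsOf, adjDiffs, PySem.Dict.getD_empty]
  | append_singleton t a ih =>
      rw [List.foldl_append, List.foldl_cons, List.foldl_nil]
      have hfst := fst_loopB f t (PySem.Dict.empty, PySem.Dict.empty)
      have hget := get?_insert_fold f t (f a)
      simp only [hfst, hget]
      by_cases hc : c = f a
      · subst hc
        have hpos : positionsOf f (t ++ [a]) (f a) = positionsOf f t (f a) ++ [a] := by
          simp [positionsOf, List.filter_append]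
        rw [hpos]
        cases hlast : (positionsOf f t (f a)).getLast? with
        | none =>
            have : positionsOf f t (f a) = [] := by
              cases h : positionsOf f t (f a) with
              | nil => rfl
              | cons x xs => rw [h] at hlast; simp at hlast
            simp only [this, List.nil_append]
            simp [ih, this, adjDiffs]
        | some j =>
            simp only []
            rw [PySem.Dict.getD_modify]
            rw [if_pos rfl, ih, adjDiffs_concat _ j a hlast]
      · have hpos : positionsOf f (t ++ [a]) c = positionsOf f t c := by
          have : (f a == c) = false := by simp; exact fun h => hc h.symm
          simp [positionsOf, List.filter_append, this]
        rw [hpos]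
        cases hlast : (positionsOf f t (f a)).getLast? with
        | none => simpa using ih
        | some j =>
            simp only []
            rw [PySem.Dict.getD_modify, if_neg hc, ih]

lemma ports_agree (text : String) (seq_len : Int) :
    find_repeated_sequences_spacings text seq_len = find_repeated_sequences_spacings_alt text seq_len := by
  unfold find_repeated_sequences_spacings find_repeated_sequences_spacings_alt
  set cs := text.toList with hcs
  set idxs := PySem.List.pyRange 0 (PySem.Str.len text - seq_len) 1 with hidxs
  set f : Int → List Char := fun i => PySem.List.slice cs (some i) (some (i + seq_len)) with hf
  simp only []
  -- rewrite B's pair fold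
  have hfst := fst_loopB f idxs (PySem.Dict.empty, PySem.Dict.empty)
  simp only [hf] at hfst
  rw [hfst]
  -- keys of both sides
  have hkeysA : ((idxs.foldl
      (fun d i => d.modify (PySem.List.slice cs (some i) (some (i + seq_len))) [] (fun l => l ++ [i]))
      PySem.Dict.empty) : PySem.Dict (List Char) (List Int)).keys
      = PySem.Set.update ([] : List (List Char)) (idxs.map f) := by
    have := PySem.Dict.keys_foldl_modify_key idxs f [] (fun _ i v => v ++ [i])
      (PySem.Dict.empty : PySem.Dict (List Char) (List Int))
    simpa [hf, PySem.Dict.keys_empty] using this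
  have hkeysB : ((idxs.foldl (fun d i =>
        d.insert (PySem.List.slice cs (some i) (some (i + seq_len))) i)
        (PySem.Dict.empty : PySem.Dict (List Char) Int)).keys)
      = PySem.Set.update ([] : List (List Char)) (idxs.map f) := by
    have := PySem.Dict.keys_foldl_insert_key idxs f (fun _ i => i)
      (PySem.Dict.empty : PySem.Dict (List Char) Int)
    simpa [hf, PySem.Dict.keys_empty] using this
  have hnodup : ((idxs.foldl
      (fun d i => d.modify (PySem.List.slice cs (some i) (some (i + seq_len))) [] (fun l => l ++ [i]))
      PySem.Dict.empty) : PySem.Dict (List Char) (List Int)).keys.Nodup := by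
    have := PySem.Dict.nodup_keys_foldl_modify_key idxs f [] (fun _ i v => v ++ [i])
      (PySem.Dict.empty : PySem.Dict (List Char) (List Int)) (by simp)
    simpa [hf] using this
  rw [PySem.Dict.values_eq_map_keys _ hnodup [], List.foldl_map, hkeysA, hkeysB]
  apply List.foldl_ext
  intro acc c _
  have hsp := spacing_getD f idxs c
  simp only [hf] at hsp
  rw [hsp]
  have hsnd := snd_loopB f idxs c
  simp only [hf] at hsnd
  rw [hsnd]
  by_cases h : 1 < (positionsOf (fun i => PySem.List.slice cs (some i) (some (i + seq_len))) idxs c).length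
  · rw [if_pos h, innerA_eq]
  · rw [if_neg h, adjDiffs_short _ (by omega)]
    simp

-- ===== VERDICT (by name: the statement is the Claim_ definition above) =====
theorem find_repeated_sequences_spacings_spec : Claim_equal_find_repeated_sequences_spacings := by
  intro text seq_len _
  unfold Spec_find_repeated_sequences_spacings
  exact ports_agree text seq_len
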